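-- pv_equiv track=rewrite | github.com/adithyakr8055/Basketball_Analysis | predictive_play_engine.py | _segment_possessions
-- ===== SOURCE A (Python) =====
-- from typing import List, Dict, Any, Tuple, Optional
--
-- def _segment_possessions(ball_acquisition: List[int]) -> List[int]:
--     """Simple segmentation by holder changes (same as analytics)."""
--     n = len(ball_acquisition)
--     if n == 0:
--         return []
--     possession_ids = [-1] * n
--     current_id = 0
--     last_holder = ball_acquisition[0]
--     possession_ids[0] = 0 if last_holder != -1 else -1
--
--     for i in range(1, n):
--         holder = ball_acquisition[i]
--         if holder == -1:
--             possession_ids[i] = -1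
--         else:
--             if last_holder == -1 or holder != last_holder:
--                 current_id += 1
--             possession_ids[i] = current_id
--         last_holder = holder
--
--     return possession_ids
-- ===== SOURCE B (Python) =====
-- from itertools import groupby
-- from typing import List
--
--
-- def _segment_possessions(ball_acquisition: List[int]) -> List[int]:
--     """Segmentation by holder changes, iterating maximal runs of equal holders."""
--     out: List[int] = []
--     current_id = 0
--     first_group = True
--     for holder, run in groupby(ball_acquisition):
--         k = sum(1 for _ in run)
--         if holder == -1:
--             out.extend([-1] * k)
--         else:
--             if not first_group:
--                 current_id += 1
--             out.extend([current_id] * k)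
--         first_group = False
--     return out
-- ===== Notes on version B (the rewrite author's own statement) =====
-- stated objective: idiomatic
-- what changed: Replaces the index loop with last-holder state by itertools.groupby over maximal runs of equal holders, emitting one ID per run (incrementing for every non-first real run) and extending the output per run.
import Mathlib
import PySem

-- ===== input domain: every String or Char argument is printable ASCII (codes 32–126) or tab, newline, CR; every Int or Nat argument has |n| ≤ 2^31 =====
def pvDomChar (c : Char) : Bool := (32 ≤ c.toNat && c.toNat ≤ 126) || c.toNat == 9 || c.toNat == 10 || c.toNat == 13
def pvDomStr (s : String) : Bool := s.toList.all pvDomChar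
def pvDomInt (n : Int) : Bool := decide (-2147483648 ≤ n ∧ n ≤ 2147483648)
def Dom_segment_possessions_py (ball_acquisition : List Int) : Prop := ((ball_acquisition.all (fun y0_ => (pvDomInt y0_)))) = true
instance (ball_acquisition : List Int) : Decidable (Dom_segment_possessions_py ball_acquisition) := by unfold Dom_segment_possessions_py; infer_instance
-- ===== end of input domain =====

-- B rewrites A's index loop as an iteration over maximal runs of equal holders (groupby); equivalence of return values is proved for all inputs.

-- ===== PORT A =====
-- state: (possession_ids assigned so far, current_id, last_holder)
def segment_possessions_py (ball_acquisition : List Int) : List Int :=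
  match ball_acquisition with
  | [] => []
  | b0 :: rest =>
    let first : Int := if b0 ≠ -1 then 0 else -1
    (rest.foldl (fun (st : List Int × Int × Int) (holder : Int) =>
      if holder = -1 then (st.1 ++ [(-1 : Int)], st.2.1, holder)
      else
        let cur' := if st.2.2 = -1 ∨ holder ≠ st.2.2 then st.2.1 + 1 else st.2.1
        (st.1 ++ [cur'], cur', holder)) ([first], 0, b0)).1

-- ===== PORT B =====
-- takeRun/pyGroupby port itertools.groupby: maximal runs of equal values as (value, run length)
def takeRun (x : Int) : List Int → Nat × List Int
  | [] => (0, [])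
  | y :: ys => if y = x then ((takeRun x ys).1 + 1, (takeRun x ys).2) else (0, y :: ys)

theorem takeRun_len (x : Int) (ys : List Int) : (takeRun x ys).2.length ≤ ys.length := by
  induction ys with
  | nil => simp [takeRun]
  | cons y ys ih => simp only [takeRun]; split_ifs <;> simp <;> omega

def pyGroupby : List Int → List (Int × Nat)
  | [] => []
  | x :: xs => (x, (takeRun x xs).1 + 1) :: pyGroupby (takeRun x xs).2
termination_by l => l.length
decreasing_by exact Nat.lt_succ_of_le (takeRun_len x xs)

-- state: (out, current_id, first_group)
def segment_possessions_py_alt (ball_acquisition : List Int) : List Int :=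
  ((pyGroupby ball_acquisition).foldl (fun (st : List Int × Int × Bool) (g : Int × Nat) =>
    if g.1 = -1 then (st.1 ++ List.replicate g.2 (-1 : Int), st.2.1, false)
    else
      let cur' := if st.2.2 then st.2.1 else st.2.1 + 1
      (st.1 ++ List.replicate g.2 cur', cur', false)) ([], 0, true)).1

-- ===== PRECONDITION & SPEC =====
def Spec_segment_possessions_py (ball_acquisition : List Int) (out : List Int) : Prop := out = segment_possessions_py_alt ball_acquisition
instance (ball_acquisition : List Int) (out : List Int) : Decidable (Spec_segment_possessions_py ball_acquisition out) := by unfold Spec_segment_possessions_py; infer_instance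

-- ===== CLAIM (what is proved, stated in full; the proofs are below) =====
def Claim_equal_segment_possessions_py : Prop := ∀ (ball_acquisition : List Int), Dom_segment_possessions_py ball_acquisition → Spec_segment_possessions_py ball_acquisition (segment_possessions_py ball_acquisition)

-- ===== LEMMAS AND PROOFS =====

-- element-wise reference recursion matching A's loop body
def refAux : Int → Int → List Int → List Int
  | _, _, [] => []
  | last, cur, h :: t =>
    if h = -1 then (-1 : Int) :: refAux h cur t
    else
      let cur' := if last = -1 ∨ h ≠ last then cur + 1 else cur
      cur' :: refAux h cur' t

-- run-wise reference recursion matching B's loop body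
def bRec : Bool → Int → List (Int × Nat) → List Int
  | _, _, [] => []
  | first, cur, (v, k) :: gs =>
    if v = -1 then List.replicate k (-1 : Int) ++ bRec false cur gs
    else
      let cur' := if first then cur else cur + 1
      List.replicate k cur' ++ bRec false cur' gs

theorem foldA_eq (xs : List Int) : ∀ (acc : List Int) (cur last : Int),
    (xs.foldl (fun (st : List Int × Int × Int) (holder : Int) =>
      if holder = -1 then (st.1 ++ [(-1 : Int)], st.2.1, holder)
      else
        let cur' := if st.2.2 = -1 ∨ holder ≠ st.2.2 then st.2.1 + 1 else st.2.1
        (st.1 ++ [cur'], cur', holder)) (acc, cur, last)).1 = acc ++ refAux last cur xs := by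
  induction xs with
  | nil => intro acc cur last; simp [refAux]
  | cons h t ih =>
    intro acc cur last
    simp only [List.foldl, refAux]
    split_ifs <;> simp [ih, List.append_assoc]

theorem foldB_eq (gs : List (Int × Nat)) : ∀ (acc : List Int) (cur : Int) (first : Bool),
    (gs.foldl (fun (st : List Int × Int × Bool) (g : Int × Nat) =>
      if g.1 = -1 then (st.1 ++ List.replicate g.2 (-1 : Int), st.2.1, false)
      else
        let cur' := if st.2.2 then st.2.1 else st.2.1 + 1
        (st.1 ++ List.replicate g.2 cur', cur', false)) (acc, cur, first)).1 = acc ++ bRec first cur gs := by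
  induction gs with
  | nil => intro acc cur first; simp [bRec]
  | cons g gs ih =>
    intro acc cur first
    obtain ⟨v, k⟩ := g
    simp only [List.foldl, bRec]
    split_ifs <;> simp [ih, List.append_assoc]

theorem takeRun_decomp (x : Int) (ys : List Int) :
    ys = List.replicate (takeRun x ys).1 x ++ (takeRun x ys).2 := by
  induction ys with
  | nil => simp [takeRun]
  | cons y ys ih =>
    simp only [takeRun]
    split_ifs with h
    · subst h; simpa [List.replicate_succ] using ih
    · simp

theorem takeRun_head (x : Int) (ys : List Int) :
    ∀ z ∈ (takeRun x ys).2.head?, z ≠ x := by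
  induction ys with
  | nil => simp [takeRun]
  | cons y ys ih =>
    simp only [takeRun]
    split_ifs with h
    · exact ih
    · simpa using h

theorem refAux_run (h c : Int) (k : Nat) (r : List Int) :
    refAux h c (List.replicate k h ++ r) =
      List.replicate k (if h = -1 then -1 else c) ++ refAux h c r := by
  induction k with
  | zero => simp
  | succ k ih =>
    simp only [List.replicate_succ, List.cons_append, refAux]
    split_ifs with hh1 hh2
    · rw [ih]; simp [hh1, List.replicate_succ]
    · exact absurd hh2 (by simp [hh1])
    · rw [ih]; simp [hh1, List.replicate_succ]

-- once past the first group, B's run recursion equals A's element recursion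
theorem bRec_eq_refAux (xs : List Int) : ∀ (last cur : Int),
    (∀ z ∈ xs.head?, z = -1 ∨ last = -1 ∨ z ≠ last) →
    bRec false cur (pyGroupby xs) = refAux last cur xs := by
  induction xs using pyGroupby.induct with
  | case1 => intro last cur _; simp [pyGroupby, refAux, bRec]
  | case2 h t ih =>
    intro last cur hcond
    rw [pyGroupby]
    rcases hkr : takeRun h t with ⟨k, r⟩
    rw [hkr] at ih
    dsimp only at ih ⊢
    have hdec : t = List.replicate k h ++ r := by
      have := takeRun_decomp h t; rwa [hkr] at this
    have hhead : ∀ z ∈ r.head?, z ≠ h := by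
      have := takeRun_head h t; rwa [hkr] at this
    have hcond' := hcond h (by simp)
    rw [hdec]
    by_cases hh : h = -1
    · subst hh
      rw [show refAux last cur ((-1 : Int) :: (List.replicate k (-1) ++ r)) =
            -1 :: refAux (-1) cur (List.replicate k (-1) ++ r) from by rw [refAux, if_pos rfl]]
      rw [refAux_run, if_pos rfl, ← ih (-1) cur (fun z hz => Or.inr (Or.inl rfl))]
      simp [bRec, List.replicate_succ]
    · have hstep : (if last = -1 ∨ h ≠ last then cur + 1 else cur) = cur + 1 := by
        rcases hcond' with h1 | h2 | h3
        · exact absurd h1 hh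
        · simp [h2]
        · simp [h3]
      simp only [refAux, if_neg hh]
      rw [hstep, refAux_run, if_neg hh,
        ← ih h (cur + 1) (fun z hz => Or.inr (Or.inr (hhead z hz)))]
      simp [bRec, hh, List.replicate_succ, List.cons_append]

theorem bRec_top (xs : List Int) :
    bRec true 0 (pyGroupby xs) = segment_possessions_py xs := by
  cases xs with
  | nil => simp [pyGroupby, bRec, segment_possessions_py]
  | cons h t =>
    rw [segment_possessions_py, foldA_eq, pyGroupby]
    rcases hkr : takeRun h t with ⟨k, r⟩
    dsimp only
    have hdec : t = List.replicate k h ++ r := by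
      have := takeRun_decomp h t; rwa [hkr] at this
    have hhead : ∀ z ∈ r.head?, z ≠ h := by
      have := takeRun_head h t; rwa [hkr] at this
    rw [hdec]
    by_cases hh : h = -1
    · subst hh
      rw [refAux_run, if_pos rfl, ← bRec_eq_refAux r (-1) 0 (fun z hz => Or.inr (Or.inl rfl))]
      simp [bRec, List.replicate_succ]
    · rw [refAux_run, if_neg hh, ← bRec_eq_refAux r h 0 (fun z hz => Or.inr (Or.inr (hhead z hz)))]
      simp [bRec, hh, List.replicate_succ]

-- ===== VERDICT (by name: the statement is the Claim_ definition above) =====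
theorem segment_possessions_py_spec : Claim_equal_segment_possessions_py := by
  intro xs _
  unfold Spec_segment_possessions_py
  rw [segment_possessions_py_alt, foldB_eq, List.nil_append, bRec_top]
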